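-- pv_equiv track=rewrite | github.com/nova68miner/random_miner | utils/molecules.py | get_heavy_atom_count
-- ===== SOURCE A (Python) =====
-- def get_heavy_atom_count(smiles: str) -> int:
--     """
--     Calculate the number of heavy atoms in a molecule from its SMILES string.
--     """
--     count = 0
--     i = 0
--     while i < len(smiles):
--         c = smiles[i]
--
--         if c.isalpha() and c.isupper():
--             elem_symbol = c
--
--             # If the next character is a lowercase letter, include it (e.g., 'Cl', 'Br')
--             if i + 1 < len(smiles) and smiles[i + 1].islower():
--                 elem_symbol += smiles[i + 1]
--                 i += 1
--
--             # If it's not 'H', count it as a heavy atom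
--             if elem_symbol != 'H':
--                 count += 1
--
--         i += 1
--
--     return count
-- ===== SOURCE B (Python) =====
-- def get_heavy_atom_count(smiles: str) -> int:
--     # Staged subtraction: every heavy atom contributes exactly one uppercase
--     # letter, so count all uppercase letters, then subtract the lone hydrogens
--     # ('H' not followed by a lowercase letter), found by pairing each character
--     # with its successor (sentinel-padded).
--     uppercase_total = sum(c.isupper() for c in smiles)
--     lone_hydrogens = sum(a == 'H' and not b.islower()
--                          for a, b in zip(smiles, smiles[1:] + ' '))
--     return uppercase_total - lone_hydrogens
-- ===== Notes on version B (the rewrite author's own statement) =====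
-- stated objective: faster
-- what changed: Replaces A's single index-jumping scan that builds 1-2 char element symbols and counts non-'H' ones with a staged subtraction: one pass counts all uppercase letters, a second pass over (char, successor) pairs counts lone hydrogens, and the result is their difference (no per-char string building or index bookkeeping).
import Mathlib
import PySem

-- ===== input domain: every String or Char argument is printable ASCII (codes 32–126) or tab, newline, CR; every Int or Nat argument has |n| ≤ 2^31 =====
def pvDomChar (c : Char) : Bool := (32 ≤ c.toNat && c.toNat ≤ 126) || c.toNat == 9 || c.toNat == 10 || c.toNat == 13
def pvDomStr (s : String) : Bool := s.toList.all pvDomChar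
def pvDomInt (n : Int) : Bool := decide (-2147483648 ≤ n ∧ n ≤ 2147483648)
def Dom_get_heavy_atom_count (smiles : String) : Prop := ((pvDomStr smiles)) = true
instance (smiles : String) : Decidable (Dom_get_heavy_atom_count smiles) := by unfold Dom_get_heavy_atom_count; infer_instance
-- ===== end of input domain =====

-- B replaces A's index-jumping tokenizer with a staged subtraction (count all
-- uppercase letters, subtract lone hydrogens found on successor pairs); same O(n) cost.

-- ===== PORT A =====
-- A's while loop over the index i; i advances by 2 when a lowercase letter is consumed.
def pvLoopA (cs : List Char) (i : Nat) (count : Int) : Int :=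
  if h : i < cs.length then
    let c := cs[i]
    if PySem.Chars.isalpha c && PySem.Chars.isupper c then
      if h2 : i + 1 < cs.length then
        if PySem.Chars.islower cs[i + 1] then
          -- elem_symbol = c + smiles[i+1]; a two-char symbol is never 'H'
          pvLoopA cs (i + 2) (if [c, cs[i + 1]] ≠ ['H'] then count + 1 else count)
        else
          pvLoopA cs (i + 1) (if [c] ≠ ['H'] then count + 1 else count)
      else
        pvLoopA cs (i + 1) (if [c] ≠ ['H'] then count + 1 else count)
    else
      pvLoopA cs (i + 1) count
  else count
termination_by cs.length - i
decreasing_by all_goals omega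

def get_heavy_atom_count (smiles : String) : Int := pvLoopA smiles.toList 0 0

-- ===== PORT B =====
-- B's lone-hydrogen predicate on a (char, successor) pair.
def pvLoneH (p : Char × Char) : Bool := p.1 == 'H' && !PySem.Chars.islower p.2

def get_heavy_atom_count_alt (smiles : String) : Int :=
  let cs := smiles.toList
  let uppercaseTotal : Int := (cs.countP PySem.Chars.isupper : Nat)
  let loneHydrogens : Int := ((cs.zip (cs.drop 1 ++ [' '])).countP pvLoneH : Nat)
  uppercaseTotal - loneHydrogens

-- ===== PRECONDITION & SPEC =====
def Spec_get_heavy_atom_count (smiles : String) (out : Int) : Prop := out = get_heavy_atom_count_alt smiles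
instance (smiles : String) (out : Int) : Decidable (Spec_get_heavy_atom_count smiles out) := by unfold Spec_get_heavy_atom_count; infer_instance

-- ===== CLAIM (what is proved, stated in full; the proofs are below) =====
def Claim_equal_get_heavy_atom_count : Prop := ∀ (smiles : String), Dom_get_heavy_atom_count smiles → Spec_get_heavy_atom_count smiles (get_heavy_atom_count smiles)

-- ===== LEMMAS AND PROOFS =====

-- A's condition (isalpha c && isupper c) is just isupper c.
lemma pv_alpha_upper (c : Char) :
    (PySem.Chars.isalpha c && PySem.Chars.isupper c) = PySem.Chars.isupper c := by
  cases h : PySem.Chars.isupper c <;> simp [PySem.Chars.isalpha, h]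

lemma pv_islower_not_isupper (c : Char) :
    PySem.Chars.islower c = true → PySem.Chars.isupper c = false := by
  have ha : 'a'.val.toNat = 97 := rfl
  have hz : 'z'.val.toNat = 122 := rfl
  have hA : 'A'.val.toNat = 65 := rfl
  have hZ : 'Z'.val.toNat = 90 := rfl
  simp only [PySem.Chars.islower, PySem.Chars.isupper, decide_eq_true_eq, Bool.and_eq_true,
    Bool.and_eq_false_iff, decide_eq_false_iff_not, Char.le_def,
    UInt32.le_iff_toNat_le, ha, hz, hA, hZ]
  intro h
  omega

lemma pv_not_upper_ne_H (c : Char) :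
    PySem.Chars.isupper c = false → (c == 'H') = false := by
  intro h
  cases hc : c == 'H'
  · rfl
  · exfalso
    have : c = 'H' := by simpa using hc
    subst this
    simp [PySem.Chars.isupper] at h

lemma pv_islower_ne_H (c : Char) :
    PySem.Chars.islower c = true → (c == 'H') = false := by
  intro h
  exact pv_not_upper_ne_H c (pv_islower_not_isupper c h)

-- The successor-pair list has the same length as the string.
lemma pv_pairs_length (cs : List Char) :
    (cs.zip (cs.drop 1 ++ [' '])).length = cs.length := by
  simp [List.length_zip]
  omega

-- The i-th successor pair.
lemma pv_pairs_get (cs : List Char) (i : Nat) (h : i < cs.length) :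
    (cs.zip (cs.drop 1 ++ [' ']))[i]'(by rw [pv_pairs_length]; exact h)
      = (cs[i], if h2 : i + 1 < cs.length then cs[i + 1] else ' ') := by
  rw [List.getElem_zip]
  congr 1
  by_cases h2 : i + 1 < cs.length
  · rw [dif_pos h2, List.getElem_append_left (by simp; omega)]
    simp
  · rw [dif_neg h2, List.getElem_append_right (by simp; omega)]
    exact List.getElem_singleton _

lemma pv_pairs_drop (cs : List Char) (i : Nat) (h : i < cs.length) :
    (cs.zip (cs.drop 1 ++ [' '])).drop i
      = (cs[i], if h2 : i + 1 < cs.length then cs[i + 1] else ' ')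
        :: (cs.zip (cs.drop 1 ++ [' '])).drop (i + 1) := by
  rw [List.drop_eq_getElem_cons (by rw [pv_pairs_length]; exact h), pv_pairs_get cs i h]

-- Loop invariant: A's loop from index i adds (uppercase in the suffix) − (lone H in the suffix).
lemma pv_loopA_eq (cs : List Char) (i : Nat) (count : Int) :
    pvLoopA cs i count
      = count + (((cs.drop i).countP PySem.Chars.isupper : Nat) : Int)
          - (((((cs.zip (cs.drop 1 ++ [' '])).drop i).countP pvLoneH : Nat)) : Int) := by
  by_cases h : i < cs.length
  · rw [pvLoopA, dif_pos h,
      List.drop_eq_getElem_cons h, List.countP_cons,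
      pv_pairs_drop cs i h, List.countP_cons]
    simp only [pv_alpha_upper]
    by_cases hup : PySem.Chars.isupper cs[i] = true
    · rw [if_pos hup]
      by_cases h2 : i + 1 < cs.length
      · rw [dif_pos h2]
        by_cases hlo : PySem.Chars.islower cs[i + 1] = true
        · rw [if_pos hlo, if_pos (by simp), pv_loopA_eq cs (i + 2),
            List.drop_eq_getElem_cons h2, List.countP_cons,
            pv_pairs_drop cs (i + 1) h2, List.countP_cons]
          have hu2 : PySem.Chars.isupper cs[i + 1] = false := pv_islower_not_isupper _ hlo
          have hp1 : pvLoneH (cs[i], if h2 : i + 1 < cs.length then cs[i + 1] else ' ') = false := by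
            rw [dif_pos h2]; simp [pvLoneH, hlo]
          have hp2 : pvLoneH (cs[i + 1], if h3 : i + 1 + 1 < cs.length then cs[i + 1 + 1] else ' ') = false := by
            simp [pvLoneH, pv_islower_ne_H _ hlo]
          rw [hp1, hp2, hu2, hup]
          have : i + 1 + 1 = i + 2 := by omega
          rw [this]
          simp only [if_true]
          push_cast
          ring
        · rw [if_neg hlo, pv_loopA_eq cs (i + 1)]
          have hp1 : pvLoneH (cs[i], if h2 : i + 1 < cs.length then cs[i + 1] else ' ')
              = (cs[i] == 'H') := by
            rw [dif_pos h2]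
            simp [pvLoneH, hlo]
          rw [hp1, hup]
          by_cases hH : cs[i] = 'H'
          · simp only [hH, ne_eq, List.cons.injEq, and_true, not_true_eq_false, if_false,
              beq_self_eq_true, if_true]
            push_cast; ring
          · simp only [ne_eq, List.cons.injEq, and_true, hH, not_false_eq_true, if_true,
              beq_iff_eq, if_neg hH]
            push_cast; ring
      · rw [dif_neg h2, pv_loopA_eq cs (i + 1)]
        have hp1 : pvLoneH (cs[i], if h2 : i + 1 < cs.length then cs[i + 1] else ' ')
            = (cs[i] == 'H') := by
          rw [dif_neg h2]
          simp [pvLoneH, PySem.Chars.islower]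
        rw [hp1, hup]
        by_cases hH : cs[i] = 'H'
        · simp only [hH, ne_eq, List.cons.injEq, and_true, not_true_eq_false, if_false,
            beq_self_eq_true, if_true]
          push_cast; ring
        · simp only [ne_eq, List.cons.injEq, and_true, hH, not_false_eq_true, if_true,
            beq_iff_eq, if_neg hH]
          push_cast; ring
    · rw [if_neg hup, pv_loopA_eq cs (i + 1)]
      have hu : PySem.Chars.isupper cs[i] = false := by
        revert hup; cases PySem.Chars.isupper cs[i] <;> simp
      have hp1 : pvLoneH (cs[i], if h2 : i + 1 < cs.length then cs[i + 1] else ' ') = false := by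
        simp [pvLoneH, pv_not_upper_ne_H _ hu]
      rw [hp1, hu]
      simp
  · rw [pvLoopA, dif_neg h,
      List.drop_eq_nil_of_le (by omega),
      List.drop_eq_nil_of_le (by rw [pv_pairs_length]; omega)]
    simp
termination_by cs.length - i
decreasing_by all_goals omega

-- ===== VERDICT (by name: the statement is the Claim_ definition above) =====
theorem get_heavy_atom_count_spec : Claim_equal_get_heavy_atom_count := by
  intro smiles _
  unfold Spec_get_heavy_atom_count get_heavy_atom_count get_heavy_atom_count_alt
  rw [pv_loopA_eq]
  simp
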